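-- pv_equiv track=rewrite | github.com/gaoying11/Dynamic-Specification-Mining-based-on-Transformer | FIN-DSM-T/fsa_construction/input_processing.py | simplify_trace
-- ===== SOURCE A (Python) =====
-- def simplify_trace(selected_traces):
--     ans = set()
--     for tr in selected_traces:
--         new_tr = []
--         for m in tr:
--             if len(new_tr) >= 2 and new_tr[-1] == new_tr[-2] == m:
--                 continue
--             new_tr += [m]
--         ans.add(tuple(new_tr))
--     return ans
-- ===== SOURCE B (Python) =====
-- def simplify_trace(selected_traces):
--     # Run-based: split each trace into maximal runs of equal consecutive
--     # elements and emit each run's value at most twice.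
--     ans = set()
--     for tr in selected_traces:
--         new_tr = []
--         i = 0
--         n = len(tr)
--         while i < n:
--             j = i + 1
--             while j < n and tr[j] == tr[i]:
--                 j += 1
--             new_tr += [tr[i]] * min(j - i, 2)
--             i = j
--         ans.add(tuple(new_tr))
--     return ans
-- ===== Notes on version B (the rewrite author's own statement) =====
-- stated objective: alternative
-- what changed: B collapses each trace by splitting it into maximal runs of equal consecutive elements and emitting each run's value at most twice, instead of A's element-by-element scan guarded by a last-two-equality test on the growing output.
import Mathlib
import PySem

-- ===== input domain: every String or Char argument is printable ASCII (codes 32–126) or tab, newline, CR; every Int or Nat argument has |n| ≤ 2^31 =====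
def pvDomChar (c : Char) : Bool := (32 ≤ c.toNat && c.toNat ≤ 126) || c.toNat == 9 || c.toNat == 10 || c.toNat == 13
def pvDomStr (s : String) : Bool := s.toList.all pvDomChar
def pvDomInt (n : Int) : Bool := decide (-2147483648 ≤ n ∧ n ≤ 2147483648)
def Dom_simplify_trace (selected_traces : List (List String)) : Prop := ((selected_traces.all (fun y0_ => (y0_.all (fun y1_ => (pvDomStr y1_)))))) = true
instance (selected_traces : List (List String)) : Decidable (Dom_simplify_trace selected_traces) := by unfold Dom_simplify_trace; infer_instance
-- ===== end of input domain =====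

-- B collapses each trace run-by-run (emit each maximal run's value at most twice)
-- instead of A's element-by-element scan guarded by the last-two-equality test; alternative decomposition, same cost.

-- ===== PORT A =====
-- inner loop body: 'if len(new_tr) >= 2 and new_tr[-1] == new_tr[-2] == m: continue; new_tr += [m]'
def stepA (new_tr : List String) (m : String) : List String :=
  if 2 ≤ new_tr.length ∧ PySem.List.pyGet? new_tr (-1) = PySem.List.pyGet? new_tr (-2)
      ∧ PySem.List.pyGet? new_tr (-2) = some m
  then new_tr else new_tr ++ [m]

def simplify_trace (selected_traces : List (List String)) : List (List String) :=
  selected_traces.foldl (fun ans tr => PySem.Set.add ans (tr.foldl stepA [])) PySem.Set.empty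

-- ===== PORT B =====
-- inner while loop of Source B over the trace starting at index i: the counting while loop
-- measures the maximal run of tr[i] (= takeWhile on the remainder), [tr[i]] * min(j - i, 2)
-- is emitted, and i jumps to the first element past the run (= dropWhile).
def collapseRuns : List String → List String
  | [] => []
  | x :: xs =>
    List.replicate (min ((xs.takeWhile (· == x)).length + 1) 2) x
      ++ collapseRuns (xs.dropWhile (· == x))
termination_by l => l.length
decreasing_by
  simpa using Nat.lt_succ_of_le (xs.length_dropWhile_le (· == x))

def simplify_trace_alt (selected_traces : List (List String)) : List (List String) :=
  selected_traces.foldl (fun ans tr => PySem.Set.add ans (collapseRuns tr)) PySem.Set.empty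

-- ===== PRECONDITION & SPEC =====
def Spec_simplify_trace (selected_traces : List (List String)) (out : List (List String)) : Prop := out = simplify_trace_alt selected_traces
instance (selected_traces : List (List String)) (out : List (List String)) : Decidable (Spec_simplify_trace selected_traces out) := by unfold Spec_simplify_trace; infer_instance

-- ===== CLAIM (what is proved, stated in full; the proofs are below) =====
def Claim_equal_simplify_trace : Prop := ∀ (selected_traces : List (List String)), Dom_simplify_trace selected_traces → Spec_simplify_trace selected_traces (simplify_trace selected_traces)

-- ===== LEMMAS AND PROOFS =====

-- last and penultimate element of a list ending in [a, b]
lemma pyGet?_last2 (p : List String) (a b : String) :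
    PySem.List.pyGet? (p ++ [a, b]) (-2) = some a := by
  rw [show (-2 : Int) = -((2 : Nat) : Int) by norm_num,
      PySem.List.pyGet?_neg_natCast _ _ (by omega) (by simp)]
  simp

lemma pyGet?_last1 (p : List String) (a b : String) :
    PySem.List.pyGet? (p ++ [a, b]) (-1) = some b := by
  rw [show p ++ [a, b] = (p ++ [a]) ++ [b] by simp,
      PySem.List.pyGet?_neg_one_append_singleton]

-- A's step skips when the accumulator already ends in [m, m].
lemma stepA_skip (pre : List String) (m : String) :
    stepA (pre ++ [m, m]) m = pre ++ [m, m] := by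
  unfold stepA
  rw [if_pos ⟨by simp, by rw [pyGet?_last1, pyGet?_last2], pyGet?_last2 pre m m⟩]

-- A's step appends when the accumulator does not end in m.
lemma stepA_app (acc : List String) (m : String) (h : acc.getLast? ≠ some m) :
    stepA acc m = acc ++ [m] := by
  unfold stepA
  rw [if_neg]
  rintro ⟨-, h1, h2⟩
  exact h (by rw [← PySem.List.pyGet?_neg_one, h1, h2])

-- repeated skips over a run already emitted twice
lemma foldl_skip (pre : List String) (m : String) (k : Nat) :
    List.foldl stepA (pre ++ [m, m]) (List.replicate k m) = pre ++ [m, m] := by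
  induction k with
  | zero => rfl
  | succ n ih => simpa [List.replicate_succ, stepA_skip] using ih

lemma takeWhile_beq_replicate (x : String) (xs : List String) :
    xs.takeWhile (· == x) = List.replicate (xs.takeWhile (· == x)).length x := by
  induction xs with
  | nil => simp
  | cons y ys ih =>
    by_cases h : y = x
    · subst h; simpa [List.replicate_succ] using ih
    · simp [h]

lemma head?_dropWhile_beq (x : String) (xs : List String) :
    (xs.dropWhile (· == x)).head? ≠ some x := by
  intro h
  have := List.head?_dropWhile_not (· == x) xs
  rw [h] at this
  simp at this

-- main invariant: starting from any accumulator whose last element differs from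
-- the head of the remaining trace, A's scan appends exactly the run-collapsed rest.
lemma main_inv (n : Nat) : ∀ (tr acc : List String), tr.length ≤ n →
    (∀ x, acc.getLast? = some x → tr.head? ≠ some x) →
    List.foldl stepA acc tr = acc ++ collapseRuns tr := by
  induction n with
  | zero =>
    intro tr acc h _
    rw [List.length_eq_zero_iff.mp (Nat.le_zero.mp h)]
    simp [collapseRuns]
  | succ n ih =>
    intro tr acc hlen hlast
    match tr with
    | [] => simp [collapseRuns]
    | x :: xs =>
      have hax : acc.getLast? ≠ some x := by
        intro h; exact hlast x h (by simp)
      have hrest : ∀ y, (xs.dropWhile (· == x)).head? = some y → y ≠ x := by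
        intro y hy h
        exact head?_dropWhile_beq x xs (h ▸ hy)
      have hrlen : (xs.dropWhile (· == x)).length ≤ n := by
        have := xs.length_dropWhile_le (· == x)
        simp at hlen; omega
      have hsplit : xs = xs.takeWhile (· == x) ++ xs.dropWhile (· == x) :=
        (List.takeWhile_append_dropWhile).symm
      rw [collapseRuns]
      cases hk : (xs.takeWhile (· == x)).length with
      | zero =>
        -- run of length 1: append x once, recurse
        have hx0 : xs.takeWhile (· == x) = [] := List.length_eq_zero_iff.mp hk
        have hxs : xs.dropWhile (· == x) = xs := by
          conv_rhs => rw [hsplit]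
          rw [hx0]; simp
        have := ih xs (acc ++ [x]) (by simp at hlen ⊢; omega)
          (by intro y hy hh
              simp at hy; subst hy
              rw [← hxs] at hh
              exact hrest x hh rfl)
        rw [List.foldl_cons, stepA_app acc x hax, this, hxs]
        simp
      | succ j =>
        -- run of length ≥ 2: append x twice, skip the rest of the run, recurse
        have hrun : xs.takeWhile (· == x) = x :: List.replicate j x := by
          rw [takeWhile_beq_replicate, hk]; rfl
        have hlast2 : (acc ++ [x, x]).getLast? = some x := by simp
        have ih2 := ih (xs.dropWhile (· == x)) (acc ++ [x, x]) hrlen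
          (by intro y hy hh
              rw [hlast2] at hy
              have hxy : x = y := by injection hy
              exact hrest y hh hxy.symm)
        rw [List.foldl_cons, stepA_app acc x hax]
        conv_lhs => rw [hsplit, hrun]
        rw [List.foldl_append, List.foldl_cons]
        have hxx : stepA (acc ++ [x]) x = acc ++ [x, x] := by
          rcases List.eq_nil_or_concat acc with h | ⟨p, a, rfl⟩
          · subst h
            unfold stepA
            rw [if_neg]; · rfl
            rintro ⟨h2, -⟩; simp at h2
          · have ha : a ≠ x := by
              intro h; exact hax (by simp [h])
            unfold stepA
            rw [if_neg]; · simp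
            rintro ⟨-, -, h2⟩
            rw [show p.concat a ++ [x] = p ++ [a, x] by simp, pyGet?_last2] at h2
            exact ha (by injection h2)
        rw [hxx, foldl_skip, ih2]
        simp

lemma inner_eq (tr : List String) : List.foldl stepA ([] : List String) tr = collapseRuns tr := by
  simpa using main_inv tr.length tr [] le_rfl (by simp)

-- ===== VERDICT (by name: the statement is the Claim_ definition above) =====
theorem simplify_trace_spec : Claim_equal_simplify_trace := by
  intro sel _
  show simplify_trace sel = simplify_trace_alt sel
  unfold simplify_trace simplify_trace_alt
  simp only [inner_eq]
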